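-- pv_equiv track=rewrite | github.com/malkiavec/Probabilitysystemforpick3pick4 | streamlit_app.py | greedy_multiset_mapping
-- ===== SOURCE A (Python) =====
-- from collections import Counter, defaultdict
-- from typing import List, Tuple, Dict, Iterable, Optional
--
-- def greedy_multiset_mapping(a: Tuple[int, ...], b: Tuple[int, ...]) -> List[Tuple[int, int]]:
--     ca, cb = Counter(a), Counter(b)
--     pairs: List[Tuple[int, int]] = []
--     for d in range(10):
--         m = min(ca[d], cb[d])
--         if m:
--             pairs.extend((d, d) for _ in range(m))
--             ca[d] -= m
--             cb[d] -= m
--     rem_a, rem_b = [], []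
--     for d in range(10):
--         if ca[d] > 0:
--             rem_a.extend([d] * ca[d])
--         if cb[d] > 0:
--             rem_b.extend([d] * cb[d])
--     rem_a.sort()
--     rem_b.sort()
--     pairs.extend(zip(rem_a, rem_b))
--     return pairs
-- ===== SOURCE B (Python) =====
-- def greedy_multiset_mapping(a, b):
--     xs = sorted(d for d in a if 0 <= d <= 9)
--     ys = sorted(d for d in b if 0 <= d <= 9)
--     pairs = []
--     leftover_a, leftover_b = [], []
--     i = j = 0
--     while i < len(xs) and j < len(ys):
--         if xs[i] == ys[j]:
--             pairs.append((xs[i], xs[i]))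
--             i += 1
--             j += 1
--         elif xs[i] < ys[j]:
--             leftover_a.append(xs[i])
--             i += 1
--         else:
--             leftover_b.append(ys[j])
--             j += 1
--     leftover_a.extend(xs[i:])
--     leftover_b.extend(ys[j:])
--     pairs.extend(zip(leftover_a, leftover_b))
--     return pairs
-- ===== Notes on version B (the rewrite author's own statement) =====
-- stated objective: alternative
-- what changed: Replaces the two counter-based passes over digits 0..9 with filter-to-range, sort both lists, and a single two-pointer merge that emits equal pairs and accumulates leftovers on the fly.
import Mathlib
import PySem

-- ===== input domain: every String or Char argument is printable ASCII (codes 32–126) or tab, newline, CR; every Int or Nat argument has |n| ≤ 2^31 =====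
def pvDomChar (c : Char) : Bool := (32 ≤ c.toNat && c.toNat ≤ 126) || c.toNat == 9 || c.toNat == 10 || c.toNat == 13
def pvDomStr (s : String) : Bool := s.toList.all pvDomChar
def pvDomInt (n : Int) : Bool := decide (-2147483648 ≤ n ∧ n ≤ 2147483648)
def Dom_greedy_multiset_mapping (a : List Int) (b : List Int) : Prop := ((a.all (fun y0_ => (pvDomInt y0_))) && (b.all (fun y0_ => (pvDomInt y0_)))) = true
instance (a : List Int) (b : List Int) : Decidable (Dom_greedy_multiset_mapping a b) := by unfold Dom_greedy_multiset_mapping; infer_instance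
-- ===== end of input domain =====

-- B replaces A's two counter-indexed passes over digits 0..9 by filter-to-range, sort both lists, and one two-pointer merge (alternative decomposition, not claimed faster).

-- ===== PORT A =====
-- step of A's first loop: pair off m = min(ca[d], cb[d]) copies of (d, d) and decrement both counters
def pvStep1 (s : List (Int × Int) × PySem.Dict Int Int × PySem.Dict Int Int) (d : Int) :
    List (Int × Int) × PySem.Dict Int Int × PySem.Dict Int Int :=
  let m := min (s.2.1.getD d 0) (s.2.2.getD d 0)
  if m ≠ 0 then
    (s.1 ++ List.replicate m.toNat (d, d), s.2.1.modify d 0 (· - m), s.2.2.modify d 0 (· - m))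
  else s

-- step of A's second loop: collect the leftover copies of d into rem_a / rem_b
def pvStep2 (c1 c2 : PySem.Dict Int Int) (r : List Int × List Int) (d : Int) : List Int × List Int :=
  (if c1.getD d 0 > 0 then r.1 ++ PySem.List.pyRepeat [d] (c1.getD d 0) else r.1,
   if c2.getD d 0 > 0 then r.2 ++ PySem.List.pyRepeat [d] (c2.getD d 0) else r.2)

def greedy_multiset_mapping (a : List Int) (b : List Int) : List (Int × Int) :=
  let ca := PySem.Dict.counter a
  let cb := PySem.Dict.counter b
  let s1 := (PySem.List.pyRange 0 10 1).foldl pvStep1 ([], ca, cb)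
  let r := (PySem.List.pyRange 0 10 1).foldl (pvStep2 s1.2.1 s1.2.2) ([], [])
  s1.1 ++ (PySem.List.sorted r.1 (fun x => x) false).zip (PySem.List.sorted r.2 (fun x => x) false)

-- ===== PORT B =====
-- B's while loop: two-pointer merge over the two sorted lists
def pvMergeLoop (xs ys : List Int) (pairs : List (Int × Int)) (la lb : List Int) :
    List (Int × Int) × List Int × List Int :=
  match xs, ys with
  | x :: xs', y :: ys' =>
    if x = y then pvMergeLoop xs' ys' (pairs ++ [(x, x)]) la lb
    else if x < y then pvMergeLoop xs' (y :: ys') pairs (la ++ [x]) lb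
    else pvMergeLoop (x :: xs') ys' pairs la (lb ++ [y])
  | xs, ys => (pairs, la ++ xs, lb ++ ys)
termination_by xs.length + ys.length

def greedy_multiset_mapping_alt (a : List Int) (b : List Int) : List (Int × Int) :=
  let xs := PySem.List.sorted (a.filter (fun d => decide (0 ≤ d) && decide (d ≤ 9))) (fun x => x) false
  let ys := PySem.List.sorted (b.filter (fun d => decide (0 ≤ d) && decide (d ≤ 9))) (fun x => x) false
  let r := pvMergeLoop xs ys [] [] []
  r.1 ++ r.2.1.zip r.2.2

-- ===== PRECONDITION & SPEC =====
def Spec_greedy_multiset_mapping (a : List Int) (b : List Int) (out : List (Int × Int)) : Prop := out = greedy_multiset_mapping_alt a b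
instance (a : List Int) (b : List Int) (out : List (Int × Int)) : Decidable (Spec_greedy_multiset_mapping a b out) := by unfold Spec_greedy_multiset_mapping; infer_instance

-- ===== CLAIM (what is proved, stated in full; the proofs are below) =====
def Claim_equal_greedy_multiset_mapping : Prop := ∀ (a : List Int) (b : List Int), Dom_greedy_multiset_mapping a b → Spec_greedy_multiset_mapping a b (greedy_multiset_mapping a b)

-- ===== LEMMAS AND PROOFS =====

def pvDigits : List Int := [0, 1, 2, 3, 4, 5, 6, 7, 8, 9]

def pvCanon (ds : List Int) (f : Int → Nat) : List Int := ds.flatMap (fun d => List.replicate (f d) d)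

theorem pvRange10 : PySem.List.pyRange 0 10 1 = pvDigits := by decide

theorem pvDigits_nodup : pvDigits.Nodup := by decide

theorem pvDigits_sorted : pvDigits.Pairwise (· < ·) := by decide

theorem mem_pvDigits {k : Int} : k ∈ pvDigits ↔ 0 ≤ k ∧ k ≤ 9 := by
  simp only [pvDigits, List.mem_cons, List.not_mem_nil, or_false]
  omega

theorem pvFlatMapCongr {α β : Type} {l : List α} {f g : α → List β} (h : ∀ x ∈ l, f x = g x) :
    l.flatMap f = l.flatMap g := by
  induction l with
  | nil => rfl
  | cons x xs ih =>
    simp only [List.flatMap_cons]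
    rw [h x (List.mem_cons_self), ih (fun y hy => h y (List.mem_cons_of_mem x hy))]

theorem mem_pvCanon {ds : List Int} {f : Int → Nat} {y : Int} (h : y ∈ pvCanon ds f) : ∃ d ∈ ds, y = d := by
  simp only [pvCanon, List.mem_flatMap, List.mem_replicate] at h
  obtain ⟨d, hd, _, rfl⟩ := h
  exact ⟨_, hd, rfl⟩

theorem count_pvCanon (ds : List Int) (f : Int → Nat) (hnd : ds.Nodup) (k : Int) :
    (pvCanon ds f).count k = if k ∈ ds then f k else 0 := by
  induction ds with
  | nil => simp [pvCanon]
  | cons d rest ih =>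
    have hnd' : d ∉ rest ∧ rest.Nodup := by simpa [List.nodup_cons] using hnd
    simp only [pvCanon, List.flatMap_cons, List.count_append, List.count_replicate]
    rw [show (rest.flatMap fun d => List.replicate (f d) d) = pvCanon rest f from rfl, ih hnd'.2]
    by_cases hk : k = d
    · subst hk
      simp [hnd'.1]
    · simp [hk, List.mem_cons]
      intro h
      exact absurd h.symm hk

theorem pairwise_pvCanon (ds : List Int) (f : Int → Nat) (h : ds.Pairwise (· < ·)) :
    (pvCanon ds f).Pairwise (· ≤ ·) := by
  induction ds with
  | nil => simp [pvCanon]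
  | cons d rest ih =>
    rw [List.pairwise_cons] at h
    simp only [pvCanon, List.flatMap_cons]
    rw [List.pairwise_append]
    refine ⟨List.pairwise_replicate.mpr (Or.inr le_rfl), ih h.2, ?_⟩
    intro x hx y hy
    obtain ⟨d', hd', rfl⟩ := mem_pvCanon hy
    rw [List.eq_of_mem_replicate hx]
    exact le_of_lt (h.1 _ hd')

theorem pvCountFilter (l : List Int) (p : Int → Bool) (k : Int) :
    (l.filter p).count k = if p k then l.count k else 0 := by
  induction l with
  | nil => simp
  | cons x xs ih =>
    simp only [List.filter_cons]
    by_cases hx : p x <;> by_cases hp : p k <;> by_cases hk : k = x <;>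
      simp_all [List.count_cons] <;> omega

-- A's first loop: the pairs it emits and the final counter values
theorem loopA1 (ds : List Int) (hnd : ds.Nodup) :
    ∀ (p : List (Int × Int)) (ca cb : PySem.Dict Int Int),
    (ds.foldl pvStep1 (p, ca, cb)).1 =
      p ++ ds.flatMap (fun d => List.replicate (min (ca.getD d 0) (cb.getD d 0)).toNat (d, d)) ∧
    (∀ k, (ds.foldl pvStep1 (p, ca, cb)).2.1.getD k 0 =
      if k ∈ ds then ca.getD k 0 - min (ca.getD k 0) (cb.getD k 0) else ca.getD k 0) ∧
    (∀ k, (ds.foldl pvStep1 (p, ca, cb)).2.2.getD k 0 =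
      if k ∈ ds then cb.getD k 0 - min (ca.getD k 0) (cb.getD k 0) else cb.getD k 0) := by
  induction ds with
  | nil => intro p ca cb; simp
  | cons d rest ih =>
    intro p ca cb
    have hnd' : d ∉ rest ∧ rest.Nodup := by simpa [List.nodup_cons] using hnd
    by_cases h0 : min (ca.getD d 0) (cb.getD d 0) = 0
    · have hstep : pvStep1 (p, ca, cb) d = (p, ca, cb) := by
        simp [pvStep1, h0]
      rw [List.foldl_cons, hstep]
      obtain ⟨ih1, ih2, ih3⟩ := ih hnd'.2 p ca cb
      refine ⟨?_, ?_, ?_⟩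
      · rw [ih1, List.flatMap_cons, h0]
        simp
      · intro k
        rw [ih2 k]
        by_cases hk : k ∈ rest
        · simp [hk, List.mem_cons]
        · by_cases hkd : k = d
          · subst hkd; simp [hk, h0]
          · simp [hk, hkd, List.mem_cons]
      · intro k
        rw [ih3 k]
        by_cases hk : k ∈ rest
        · simp [hk, List.mem_cons]
        · by_cases hkd : k = d
          · subst hkd; simp [hk, h0]
          · simp [hk, hkd, List.mem_cons]
    · have hstep : pvStep1 (p, ca, cb) d =
          (p ++ List.replicate (min (ca.getD d 0) (cb.getD d 0)).toNat (d, d),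
           ca.modify d 0 (· - min (ca.getD d 0) (cb.getD d 0)),
           cb.modify d 0 (· - min (ca.getD d 0) (cb.getD d 0))) := by
        simp [pvStep1, h0]
      rw [List.foldl_cons, hstep]
      obtain ⟨ih1, ih2, ih3⟩ := ih hnd'.2
        (p ++ List.replicate (min (ca.getD d 0) (cb.getD d 0)).toNat (d, d))
        (ca.modify d 0 (· - min (ca.getD d 0) (cb.getD d 0)))
        (cb.modify d 0 (· - min (ca.getD d 0) (cb.getD d 0)))
      refine ⟨?_, ?_, ?_⟩
      · rw [ih1, List.flatMap_cons, List.append_assoc]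
        congr 2
        apply pvFlatMapCongr
        intro d' hd'
        have hne : d' ≠ d := fun h => hnd'.1 (h ▸ hd')
        simp only [PySem.Dict.getD_modify, if_neg hne]
      · intro k
        rw [ih2 k]
        by_cases hk : k ∈ rest
        · have hne : k ≠ d := fun h => hnd'.1 (h ▸ hk)
          simp only [PySem.Dict.getD_modify, if_neg hne]
          simp [hk, List.mem_cons]
        · by_cases hkd : k = d
          · subst hkd
            simp only [if_neg hk, PySem.Dict.getD_modify]
            simp [List.mem_cons]
          · simp only [if_neg hk, PySem.Dict.getD_modify, if_neg hkd]
            simp [hk, hkd, List.mem_cons]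
      · intro k
        rw [ih3 k]
        by_cases hk : k ∈ rest
        · have hne : k ≠ d := fun h => hnd'.1 (h ▸ hk)
          simp only [PySem.Dict.getD_modify, if_neg hne]
          simp [hk, List.mem_cons]
        · by_cases hkd : k = d
          · subst hkd
            simp only [if_neg hk, PySem.Dict.getD_modify]
            simp [List.mem_cons]
          · simp only [if_neg hk, PySem.Dict.getD_modify, if_neg hkd]
            simp [hk, hkd, List.mem_cons]

-- A's second loop builds the two leftover lists
theorem loopA2 (c1 c2 : PySem.Dict Int Int) (ds : List Int) :
    ∀ r : List Int × List Int,
    ds.foldl (pvStep2 c1 c2) r =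
      (r.1 ++ ds.flatMap (fun d => List.replicate (c1.getD d 0).toNat d),
       r.2 ++ ds.flatMap (fun d => List.replicate (c2.getD d 0).toNat d)) := by
  induction ds with
  | nil => intro r; simp
  | cons d rest ih =>
    intro r
    rw [List.foldl_cons, ih]
    have h1 : (pvStep2 c1 c2 r d).1 = r.1 ++ List.replicate (c1.getD d 0).toNat d := by
      simp only [pvStep2]
      by_cases h : c1.getD d 0 > 0
      · rw [if_pos h, PySem.List.pyRepeat_singleton]
      · rw [if_neg h]
        have h' : (c1.getD d 0).toNat = 0 := by omega
        simp [h']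
    have h2 : (pvStep2 c1 c2 r d).2 = r.2 ++ List.replicate (c2.getD d 0).toNat d := by
      simp only [pvStep2]
      by_cases h : c2.getD d 0 > 0
      · rw [if_pos h, PySem.List.pyRepeat_singleton]
      · rw [if_neg h]
        have h' : (c2.getD d 0).toNat = 0 := by omega
        simp [h']
    rw [h1, h2]
    simp [List.flatMap_cons, List.append_assoc]

-- B's merge loop: draining d's from the right list while the left front is > d
theorem mergeDrain_b (d : Int) (n : Nat) :
    ∀ (xs ys : List Int) (pairs : List (Int × Int)) (la lb : List Int), (∀ x ∈ xs, d < x) →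
    pvMergeLoop xs (List.replicate n d ++ ys) pairs la lb =
      pvMergeLoop xs ys pairs la (lb ++ List.replicate n d) := by
  induction n with
  | zero => intro xs ys pairs la lb _; simp
  | succ n ihn =>
    intro xs ys pairs la lb hx
    rw [List.replicate_succ, List.cons_append]
    cases xs with
    | nil =>
      simp [pvMergeLoop, List.append_assoc]
    | cons x xs' =>
      have hdx : d < x := hx x (List.mem_cons_self)
      simp only [pvMergeLoop]
      rw [if_neg (by omega), if_neg (by omega)]
      rw [ihn (x :: xs') ys pairs la (lb ++ [d]) hx]
      rw [List.append_assoc, List.singleton_append, ← List.replicate_succ]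

-- B's merge loop: draining d's from the left list while the right front is > d
theorem mergeDrain_a (d : Int) (m : Nat) :
    ∀ (xs ys : List Int) (pairs : List (Int × Int)) (la lb : List Int), (∀ y ∈ ys, d < y) →
    pvMergeLoop (List.replicate m d ++ xs) ys pairs la lb =
      pvMergeLoop xs ys pairs (la ++ List.replicate m d) lb := by
  induction m with
  | zero => intro xs ys pairs la lb _; simp
  | succ m ihm =>
    intro xs ys pairs la lb hy
    rw [List.replicate_succ, List.cons_append]
    cases ys with
    | nil =>
      simp [pvMergeLoop, List.append_assoc]
    | cons y ys' =>
      have hdy : d < y := hy y (List.mem_cons_self)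
      simp only [pvMergeLoop]
      rw [if_neg (by omega), if_pos (by omega)]
      rw [ihm xs (y :: ys') pairs (la ++ [d]) lb hy]
      rw [List.append_assoc, List.singleton_append, ← List.replicate_succ]

-- B's merge loop on a block of equal digits at the front of both lists
theorem mergeRep (d : Int) (m : Nat) :
    ∀ (n : Nat) (xs ys : List Int) (pairs : List (Int × Int)) (la lb : List Int),
    (∀ x ∈ xs, d < x) → (∀ y ∈ ys, d < y) →
    pvMergeLoop (List.replicate m d ++ xs) (List.replicate n d ++ ys) pairs la lb =
      pvMergeLoop xs ys (pairs ++ List.replicate (min m n) (d, d))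
        (la ++ List.replicate (m - n) d) (lb ++ List.replicate (n - m) d) := by
  induction m with
  | zero =>
    intro n xs ys pairs la lb hx _
    simp only [List.replicate_zero, List.nil_append, Nat.zero_min, Nat.zero_sub,
      List.append_nil, Nat.sub_zero]
    exact mergeDrain_b d n xs ys pairs la lb hx
  | succ m ihm =>
    intro n xs ys pairs la lb hx hy
    cases n with
    | zero =>
      simp only [List.replicate_zero, List.nil_append, Nat.min_zero, Nat.zero_sub,
        List.append_nil, Nat.sub_zero]
      exact mergeDrain_a d (m + 1) xs ys pairs la lb hy
    | succ n =>
      rw [List.replicate_succ, List.replicate_succ, List.cons_append, List.cons_append]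
      simp only [pvMergeLoop]
      rw [if_pos trivial]
      rw [ihm n xs ys (pairs ++ [(d, d)]) la lb hx hy]
      rw [List.append_assoc, List.singleton_append, ← List.replicate_succ,
        Nat.succ_min_succ, Nat.succ_sub_succ, Nat.succ_sub_succ]

-- B's merge loop on two canonical digit lists
theorem mergeCanon (f g : Int → Nat) (ds : List Int) (h : ds.Pairwise (· < ·)) :
    ∀ (pairs : List (Int × Int)) (la lb : List Int),
    pvMergeLoop (pvCanon ds f) (pvCanon ds g) pairs la lb =
      (pairs ++ ds.flatMap (fun d => List.replicate (min (f d) (g d)) (d, d)),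
       la ++ pvCanon ds (fun d => f d - g d),
       lb ++ pvCanon ds (fun d => g d - f d)) := by
  induction ds with
  | nil => intro pairs la lb; simp [pvCanon, pvMergeLoop]
  | cons d rest ih =>
    intro pairs la lb
    rw [List.pairwise_cons] at h
    have hxm : ∀ x ∈ pvCanon rest f, d < x := by
      intro x hx
      obtain ⟨d', hd', rfl⟩ := mem_pvCanon hx
      exact h.1 _ hd'
    have hym : ∀ y ∈ pvCanon rest g, d < y := by
      intro y hy
      obtain ⟨d', hd', rfl⟩ := mem_pvCanon hy
      exact h.1 _ hd'
    have hcanon : ∀ (f' : Int → Nat), pvCanon (d :: rest) f' = List.replicate (f' d) d ++ pvCanon rest f' := by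
      intro f'; simp [pvCanon, List.flatMap_cons]
    rw [hcanon f, hcanon g,
      mergeRep d (f d) (g d) (pvCanon rest f) (pvCanon rest g) pairs la lb hxm hym,
      ih h.2]
    simp [hcanon, List.flatMap_cons, List.append_assoc]

-- B's sorted filtered input is the canonical digit list of its counts
theorem sortedFilter (l : List Int) :
    PySem.List.sorted (l.filter (fun d => decide (0 ≤ d) && decide (d ≤ 9))) (fun x => x) false
      = pvCanon pvDigits (fun d => l.count d) := by
  apply PySem.List.sorted_id_eq_of_perm_of_pairwise
  · rw [List.perm_iff_count]
    intro k
    rw [count_pvCanon _ _ pvDigits_nodup, pvCountFilter]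
    simp only [Bool.and_eq_true, decide_eq_true_eq]
    by_cases h0 : 0 ≤ k ∧ k ≤ 9
    · rw [if_pos h0, if_pos (mem_pvDigits.mpr h0)]
    · rw [if_neg h0, if_neg (fun hm => h0 (mem_pvDigits.mp hm))]
  · exact pairwise_pvCanon _ _ pvDigits_sorted

-- A computes: equal pairs per digit, then the zip of the two leftover canonical lists
set_option maxHeartbeats 1000000 in
theorem A_eq (a b : List Int) :
    greedy_multiset_mapping a b =
      pvDigits.flatMap (fun d => List.replicate (min (a.count d) (b.count d)) (d, d)) ++
        (pvCanon pvDigits (fun d => a.count d - b.count d)).zip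
          (pvCanon pvDigits (fun d => b.count d - a.count d)) := by
  simp only [greedy_multiset_mapping, pvRange10]
  obtain ⟨h1, h2, h3⟩ := loopA1 pvDigits pvDigits_nodup [] (PySem.Dict.counter a) (PySem.Dict.counter b)
  rw [loopA2, h1]
  simp only [List.nil_append]
  have e1 : (pvDigits.flatMap fun d =>
        List.replicate (min ((PySem.Dict.counter a).getD d 0) ((PySem.Dict.counter b).getD d 0)).toNat (d, d))
      = pvDigits.flatMap (fun d => List.replicate (min (a.count d) (b.count d)) (d, d)) := by
    apply pvFlatMapCongr
    intro d _
    rw [PySem.Dict.getD_counter, PySem.Dict.getD_counter]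
    have hmin : (min ((a.count d : Int)) ((b.count d : Int))).toNat = min (a.count d) (b.count d) := by
      omega
    rw [hmin]
  have e2 : (pvDigits.flatMap fun d =>
        List.replicate (((pvDigits.foldl pvStep1 ([], PySem.Dict.counter a, PySem.Dict.counter b)).2.1.getD d 0)).toNat d)
      = pvCanon pvDigits (fun d => a.count d - b.count d) := by
    unfold pvCanon
    apply pvFlatMapCongr
    intro d hd
    rw [h2 d, if_pos hd, PySem.Dict.getD_counter, PySem.Dict.getD_counter]
    have hsub : (((a.count d : Int)) - min ((a.count d : Int)) ((b.count d : Int))).toNat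
        = a.count d - b.count d := by omega
    rw [hsub]
  have e3 : (pvDigits.flatMap fun d =>
        List.replicate (((pvDigits.foldl pvStep1 ([], PySem.Dict.counter a, PySem.Dict.counter b)).2.2.getD d 0)).toNat d)
      = pvCanon pvDigits (fun d => b.count d - a.count d) := by
    unfold pvCanon
    apply pvFlatMapCongr
    intro d hd
    rw [h3 d, if_pos hd, PySem.Dict.getD_counter, PySem.Dict.getD_counter]
    have hsub : (((b.count d : Int)) - min ((a.count d : Int)) ((b.count d : Int))).toNat
        = b.count d - a.count d := by omega
    rw [hsub]
  have hs : ∀ (f : Int → Nat),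
      PySem.List.sorted (pvCanon pvDigits f) (fun x => x) false = pvCanon pvDigits f := fun f =>
    PySem.List.sorted_id_eq_of_perm_of_pairwise _ _ (List.Perm.refl _) (pairwise_pvCanon _ _ pvDigits_sorted)
  rw [e1, e2, e3, hs, hs]

-- B computes the same normal form
set_option maxHeartbeats 1000000 in
theorem B_eq (a b : List Int) :
    greedy_multiset_mapping_alt a b =
      pvDigits.flatMap (fun d => List.replicate (min (a.count d) (b.count d)) (d, d)) ++
        (pvCanon pvDigits (fun d => a.count d - b.count d)).zip
          (pvCanon pvDigits (fun d => b.count d - a.count d)) := by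
  simp only [greedy_multiset_mapping_alt]
  rw [sortedFilter a, sortedFilter b,
    mergeCanon (fun d => a.count d) (fun d => b.count d) pvDigits pvDigits_sorted]
  simp

-- ===== VERDICT (by name: the statement is the Claim_ definition above) =====
theorem greedy_multiset_mapping_spec : Claim_equal_greedy_multiset_mapping := by
  intro a b _
  unfold Spec_greedy_multiset_mapping
  rw [A_eq, B_eq]
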